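-- pv_equiv track=rewrite | github.com/sam-caldwell/crsce | tools/b44a_constraint_sim.py | add_subrow_blocks
-- ===== SOURCE A (Python) =====
-- S = 511
--
-- def add_subrow_blocks(rows_list, cols_list, row_offset, B):
--     """Add sub-row block sum constraint lines."""
--     block_size = (S + B - 1) // B
--     added = 0
--     for r in range(S):
--         for b in range(B):
--             c_start = b * block_size
--             c_end = min(c_start + block_size, S)
--             for c in range(c_start, c_end):
--                 rows_list.append(row_offset + added)
--                 cols_list.append(r * S + c)
--             added += 1
--     return row_offset + added, added
-- ===== SOURCE B (Python) =====
-- S = 511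
--
-- def add_subrow_blocks(rows_list, cols_list, row_offset, B):
--     """Add sub-row block sum constraint lines (flat column scan, closed-form counts)."""
--     if B <= 0:
--         return row_offset, 0
--     block_size = (S + B - 1) // B
--     for r in range(S):
--         for c in range(S):
--             rows_list.append(row_offset + r * B + c // block_size)
--             cols_list.append(r * S + c)
--     return row_offset + S * B, S * B
-- ===== Notes on version B (the rewrite author's own statement) =====
-- stated objective: faster
-- what changed: Replaces the nested per-block and per-column loops plus the running 'added' counter with one flat column scan per row using the closed forms r*B + c//block_size for the row index and (row_offset + S*B, S*B) for the return; B <= 0 yields no blocks directly.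
import Mathlib
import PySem

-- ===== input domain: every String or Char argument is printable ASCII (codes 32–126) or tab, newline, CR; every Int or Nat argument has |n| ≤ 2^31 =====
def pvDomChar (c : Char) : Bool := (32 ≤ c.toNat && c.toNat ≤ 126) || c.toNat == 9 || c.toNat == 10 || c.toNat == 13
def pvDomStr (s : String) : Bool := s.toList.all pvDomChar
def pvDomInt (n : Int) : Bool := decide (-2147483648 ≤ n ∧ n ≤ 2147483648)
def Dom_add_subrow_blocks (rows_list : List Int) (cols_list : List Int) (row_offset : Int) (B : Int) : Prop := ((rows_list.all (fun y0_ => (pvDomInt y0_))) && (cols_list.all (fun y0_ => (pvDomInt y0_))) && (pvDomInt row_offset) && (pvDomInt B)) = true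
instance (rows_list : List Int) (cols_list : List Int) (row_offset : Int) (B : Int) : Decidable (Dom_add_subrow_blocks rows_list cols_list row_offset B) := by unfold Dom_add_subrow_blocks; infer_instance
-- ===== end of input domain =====

-- B replaces A's nested per-block/per-column loops and running 'added' counter with one flat
-- column scan per row and closed-form indices/return (objective: faster).
-- A mutates rows_list/cols_list in place; Python B performs the same appends; the equivalence
-- proved here is about the RETURN value.

-- ===== PORT A =====
-- state: (rows_list, cols_list, added)
-- the two .append calls are modelled as cons onto reversed accumulators (the return value never reads them)
def pvInnerA (row_offset r : Int) (u : List Int × List Int × Int) (c : Int) : List Int × List Int × Int :=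
  ((row_offset + u.2.2) :: u.1, (r * 511 + c) :: u.2.1, u.2.2)

def pvMidA (row_offset block_size r : Int) (t : List Int × List Int × Int) (b : Int) : List Int × List Int × Int :=
  let c_start := b * block_size
  let c_end := min (c_start + block_size) 511
  let t' := (PySem.List.pyRange c_start c_end 1).foldl (pvInnerA row_offset r) t
  (t'.1, t'.2.1, t'.2.2 + 1)

def pvOuterA (row_offset block_size B : Int) (s : List Int × List Int × Int) (r : Int) : List Int × List Int × Int :=
  (PySem.List.pyRange 0 B 1).foldl (pvMidA row_offset block_size r) s

def add_subrow_blocks (rows_list : List Int) (cols_list : List Int) (row_offset : Int) (B : Int) : Int × Int :=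
  let block_size := PySem.Int.floordiv (511 + B - 1) B
  let st := (PySem.List.pyRange 0 511 1).foldl (pvOuterA row_offset block_size B) (rows_list, cols_list, (0 : Int))
  (row_offset + st.2.2, st.2.2)

-- ===== PORT B =====
def add_subrow_blocks_alt (rows_list : List Int) (cols_list : List Int) (row_offset : Int) (B : Int) : Int × Int :=
  if B ≤ 0 then (row_offset, 0)
  else
    let block_size := PySem.Int.floordiv (511 + B - 1) B
    let _st := (PySem.List.pyRange 0 511 1).foldl (fun (s : List Int × List Int) r =>
      (PySem.List.pyRange 0 511 1).foldl (fun (t : List Int × List Int) c =>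
        -- the two .append calls are modelled as cons onto reversed accumulators (the return value never reads them)
        ((row_offset + r * B + PySem.Int.floordiv c block_size) :: t.1,
         (r * 511 + c) :: t.2)) s) (rows_list, cols_list)
    (row_offset + 511 * B, 511 * B)

-- ===== PRECONDITION & SPEC =====
-- Pre_ excludes exactly B = 0, where Python A raises ZeroDivisionError.
def Pre_add_subrow_blocks (rows_list : List Int) (cols_list : List Int) (row_offset : Int) (B : Int) : Prop := B ≠ 0
instance (rows_list : List Int) (cols_list : List Int) (row_offset : Int) (B : Int) : Decidable (Pre_add_subrow_blocks rows_list cols_list row_offset B) := by unfold Pre_add_subrow_blocks; infer_instance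
def pvWitness_add_subrow_blocks : List Int × List Int × Int × Int := ([], [], 0, 2)

def Spec_add_subrow_blocks (rows_list : List Int) (cols_list : List Int) (row_offset : Int) (B : Int) (out : Int × Int) : Prop := out = add_subrow_blocks_alt rows_list cols_list row_offset B
instance (rows_list : List Int) (cols_list : List Int) (row_offset : Int) (B : Int) (out : Int × Int) : Decidable (Spec_add_subrow_blocks rows_list cols_list row_offset B out) := by unfold Spec_add_subrow_blocks; infer_instance

-- ===== CLAIM (what is proved, stated in full; the proofs are below) =====
def Claim_equal_add_subrow_blocks : Prop := ∀ (rows_list : List Int) (cols_list : List Int) (row_offset : Int) (B : Int), Dom_add_subrow_blocks rows_list cols_list row_offset B → Pre_add_subrow_blocks rows_list cols_list row_offset B → Spec_add_subrow_blocks rows_list cols_list row_offset B (add_subrow_blocks rows_list cols_list row_offset B)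

-- ===== LEMMAS AND PROOFS =====

-- A fold whose step leaves the third state component unchanged preserves it.
theorem pv_foldl_third_const (f : (List Int × List Int × Int) → Int → (List Int × List Int × Int))
    (h : ∀ u c, (f u c).2.2 = u.2.2) :
    ∀ (l : List Int) (t : List Int × List Int × Int), (l.foldl f t).2.2 = t.2.2 := by
  intro l
  induction l with
  | nil => intro t; rfl
  | cons x xs ih => intro t; simpa [List.foldl, h] using ih (f t x)

-- A fold whose step adds k to the third state component adds k * length in total.
theorem pv_foldl_third_add (f : (List Int × List Int × Int) → Int → (List Int × List Int × Int))
    (k : Int) (h : ∀ u c, (f u c).2.2 = u.2.2 + k) :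
    ∀ (l : List Int) (t : List Int × List Int × Int),
      (l.foldl f t).2.2 = t.2.2 + k * l.length := by
  intro l
  induction l with
  | nil => intro t; simp
  | cons x xs ih =>
    intro t
    simp only [List.foldl, List.length_cons]
    rw [ih (f t x), h]
    push_cast
    ring

theorem pvInnerA_third (row_offset r : Int) :
    ∀ u c, (pvInnerA row_offset r u c).2.2 = u.2.2 := by
  intro u c; rfl

theorem pvMidA_third (row_offset block_size r : Int) :
    ∀ t b, (pvMidA row_offset block_size r t b).2.2 = t.2.2 + 1 := by
  intro t b
  unfold pvMidA
  simp only
  rw [pv_foldl_third_const (pvInnerA row_offset r) (pvInnerA_third row_offset r)]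

theorem pvOuterA_third (row_offset block_size B : Int) :
    ∀ s r, (pvOuterA row_offset block_size B s r).2.2 = s.2.2 + (B.toNat : Int) := by
  intro s r
  unfold pvOuterA
  rw [pv_foldl_third_add (pvMidA row_offset block_size r) 1 (pvMidA_third row_offset block_size r)]
  rw [PySem.List.length_pyRange_one]
  simp

-- ===== VERDICT (by name: the statement is the Claim_ definition above) =====
theorem add_subrow_blocks_spec : Claim_equal_add_subrow_blocks := by
  intro rows cols ro B _ hB
  unfold Spec_add_subrow_blocks add_subrow_blocks
  have hst := pv_foldl_third_add (pvOuterA ro (PySem.Int.floordiv (511 + B - 1) B) B)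
    (B.toNat : Int) (pvOuterA_third ro (PySem.Int.floordiv (511 + B - 1) B) B)
    (PySem.List.pyRange 0 511 1) (rows, cols, (0 : Int))
  simp only
  rw [hst, PySem.List.length_pyRange_one]
  unfold add_subrow_blocks_alt
  by_cases hB0 : B ≤ 0
  · simp only [hB0, if_pos]
    have : B.toNat = 0 := Int.toNat_of_nonpos hB0
    simp [this]
  · simp only [hB0, if_false]
    refine Prod.ext ?_ ?_ <;> simp <;> omega
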